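-- pv_equiv track=rewrite | github.com/jaysooo/Algorithm | problem-solving/baekjoon/Baekjoon2775/main.py | get_people_of_room
-- ===== SOURCE A (Python) =====
-- def get_people_of_room(k_flow,n_room):
--     #k_flow = 3
--     #n_room = 4
--     people_of_room = [x for x in range(1,n_room+1)]
--
--     for f in range(1,k_flow+1):
--         current_flow = []
--         for i in range(1,len(people_of_room)+1):
--             current_flow += [sum(people_of_room[:i])]
--
--         people_of_room = current_flow
--     return people_of_room[n_room-1]
-- ===== SOURCE B (Python) =====
-- def get_people_of_room(k_flow, n_room):
--     # closed form: answer is the binomial C(n_room + k_flow, k_flow + 1),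
--     # computed by one O(k_flow) exact integer product instead of k_flow prefix-sum passes
--     c = n_room
--     for i in range(2, k_flow + 2):
--         c = c * (n_room + i - 1) // i
--     return c
-- ===== Notes on version B (the rewrite author's own statement) =====
-- stated objective: faster
-- what changed: Replaces the k rounds of re-summed prefix slices over a length-n list by the closed-form binomial coefficient C(n_room+k_flow, k_flow+1), computed with a single O(k_flow) exact integer product loop.
-- outside the precondition, e.g. on get_people_of_room(2, 0): A raises IndexError, B returns 0
import Mathlib
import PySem

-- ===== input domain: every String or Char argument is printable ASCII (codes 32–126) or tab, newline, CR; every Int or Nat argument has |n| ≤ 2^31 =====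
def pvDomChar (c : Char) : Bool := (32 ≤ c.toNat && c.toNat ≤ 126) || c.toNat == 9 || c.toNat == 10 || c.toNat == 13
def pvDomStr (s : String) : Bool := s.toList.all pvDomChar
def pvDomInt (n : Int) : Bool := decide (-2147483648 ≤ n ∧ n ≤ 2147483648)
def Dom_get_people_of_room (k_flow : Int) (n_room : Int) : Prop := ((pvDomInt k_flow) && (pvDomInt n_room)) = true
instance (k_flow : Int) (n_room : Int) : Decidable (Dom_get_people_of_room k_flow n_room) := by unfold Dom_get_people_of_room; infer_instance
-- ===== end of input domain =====

-- B replaces A's k_flow rounds of re-summed prefix slices by the closed-form binomial C(n+k, k+1),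
-- computed with one exact integer product loop; equality is proved for every k_flow and every n_room ≥ 1.

-- ===== PORT A =====
def get_people_of_room (k_flow : Int) (n_room : Int) : Int :=
  (PySem.List.pyGet?
    ((PySem.List.pyRange 1 (k_flow + 1) 1).foldl
      (fun people _f =>
        (PySem.List.pyRange 1 ((people.length : Int) + 1) 1).foldl
          (fun cur i => cur ++ [(PySem.List.slice people none (some i)).sum])
          ([] : List Int))
      (PySem.List.pyRange 1 (n_room + 1) 1))
    (n_room - 1)).getD 0

-- ===== PORT B =====
def get_people_of_room_alt (k_flow : Int) (n_room : Int) : Int :=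
  (PySem.List.pyRange 2 (k_flow + 2) 1).foldl
    (fun c i => PySem.Int.floordiv (c * (n_room + i - 1)) i) n_room

-- ===== PRECONDITION & SPEC =====
-- A raises IndexError (people_of_room[n_room-1] on an empty list) exactly when n_room ≤ 0.
def Pre_get_people_of_room (k_flow : Int) (n_room : Int) : Prop := 1 ≤ n_room
instance (k_flow : Int) (n_room : Int) : Decidable (Pre_get_people_of_room k_flow n_room) := by unfold Pre_get_people_of_room; infer_instance
def pvWitness_get_people_of_room : Int × Int := (3, 4)

def Spec_get_people_of_room (k_flow : Int) (n_room : Int) (out : Int) : Prop := out = get_people_of_room_alt k_flow n_room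
instance (k_flow : Int) (n_room : Int) (out : Int) : Decidable (Spec_get_people_of_room k_flow n_room out) := by unfold Spec_get_people_of_room; infer_instance

-- ===== CLAIM (what is proved, stated in full; the proofs are below) =====
def Claim_equal_get_people_of_room : Prop := ∀ (k_flow : Int) (n_room : Int), Dom_get_people_of_room k_flow n_room → Pre_get_people_of_room k_flow n_room → Spec_get_people_of_room k_flow n_room (get_people_of_room k_flow n_room)

-- ===== LEMMAS AND PROOFS =====

-- one prefix-sum pass, as A's inner loop performs it
def pvPass (xs : List Int) : List Int :=
  (PySem.List.pyRange 1 ((xs.length : Int) + 1) 1).foldl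
    (fun cur i => cur ++ [(PySem.List.slice xs none (some i)).sum]) ([] : List Int)

-- the list after f passes: entry j is C(j+f+1, f+1)
def pvRow (m f : Nat) : List Int :=
  (List.range m).map (fun j => ((Nat.choose (j + f + 1) (f + 1) : Nat) : Int))

-- hockey-stick identity
theorem pv_hockey (i r : Nat) :
    ((List.range i).map (fun j => Nat.choose (j + r) r)).sum = Nat.choose (i + r) (r + 1) := by
  induction i with
  | zero => simp
  | succ i ih =>
      rw [List.range_succ, List.map_append, List.sum_append, ih]
      simp only [List.map_cons, List.map_nil, List.sum_cons, List.sum_nil, Nat.add_zero]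
      have e : i + 1 + r = (i + r) + 1 := by omega
      rw [e, Nat.choose_succ_succ' (i + r) r]
      exact Nat.add_comm _ _

theorem pv_sum_cast (l : List Nat) (g : Nat → Nat) :
    (l.map (fun t => ((g t : Nat) : Int))).sum = ((l.map g).sum : Int) := by
  induction l with
  | nil => simp
  | cons x xs ih => simp [ih]

theorem pv_pass_row (m f : Nat) : pvPass (pvRow m f) = pvRow m (f + 1) := by
  unfold pvPass pvRow
  rw [PySem.List.foldl_append_singleton_eq_map, List.nil_append]
  simp only [List.length_map, List.length_range]
  rw [PySem.List.pyRange_one]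
  have hm1 : ((m : Int) + 1 - 1).toNat = m := by omega
  rw [hm1, List.map_map]
  apply List.ext_getElem (by simp) ?_
  intro j hj hj'
  have hjm : j < m := by simpa using hj'
  simp only [List.getElem_map, List.getElem_range, Function.comp_apply]
  rw [PySem.List.slice_to _ (show (0:Int) ≤ 1 + (j:Int) by positivity)]
  have ht : ((1 : Int) + (j : Int)).toNat = j + 1 := by omega
  rw [ht, ← List.map_take, List.take_range, Nat.min_eq_left (by omega)]
  have hc : (List.range (j + 1)).map (fun t => ((Nat.choose (t + f + 1) (f + 1) : Nat) : Int))
      = (List.range (j + 1)).map (fun t => ((Nat.choose (t + (f + 1)) (f + 1) : Nat) : Int)) := by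
    apply List.map_congr_left
    intro t _
    have e : t + f + 1 = t + (f + 1) := by omega
    rw [e]
  rw [hc, pv_sum_cast (List.range (j + 1)) (fun t => Nat.choose (t + (f + 1)) (f + 1)),
      pv_hockey (j + 1) (f + 1)]
  congr 2
  omega

-- a foldl that ignores the loop variable is iteration
theorem pv_foldl_const {α β : Type} (l : List β) (g : α → α) (init : α) :
    l.foldl (fun s _ => g s) init = g^[l.length] init := by
  induction l generalizing init with
  | nil => rfl
  | cons x xs ih => simp [List.foldl_cons, ih, Function.iterate_succ_apply]

theorem pv_iterate_row (m K : Nat) : pvPass^[K] (pvRow m 0) = pvRow m K := by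
  induction K with
  | zero => rfl
  | succ K ih => rw [Function.iterate_succ_apply', ih, pv_pass_row]

theorem pv_initial (n : Int) (m : Nat) (hm : n = (m : Int)) :
    PySem.List.pyRange 1 (n + 1) 1 = pvRow m 0 := by
  subst hm
  rw [PySem.List.pyRange_one]
  unfold pvRow
  have e : ((m : Int) + 1 - 1).toNat = m := by omega
  rw [e]
  apply List.map_congr_left
  intro j _
  simp [Nat.choose_one_right]
  omega

theorem pv_A_closed (k n : Int) (m : Nat) (hm : n = (m : Int)) (h1 : 1 ≤ m) :
    get_people_of_room k n = ((Nat.choose (m + k.toNat) (k.toNat + 1) : Nat) : Int) := by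
  unfold get_people_of_room
  rw [pv_initial n m hm]
  have hfun : (fun (people : List Int) (_f : Int) =>
      (PySem.List.pyRange 1 ((people.length : Int) + 1) 1).foldl
        (fun cur i => cur ++ [(PySem.List.slice people none (some i)).sum])
        ([] : List Int)) = (fun (s : List Int) (_ : Int) => pvPass s) := rfl
  rw [hfun]
  rw [pv_foldl_const (PySem.List.pyRange 1 (k + 1) 1) pvPass (pvRow m 0)]
  rw [PySem.List.length_pyRange_one]
  have hK : (k + 1 - 1).toNat = k.toNat := by omega
  rw [hK, pv_iterate_row]
  have hidx : n - 1 = ((m - 1 : Nat) : Int) := by omega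
  rw [hidx, PySem.List.pyGet?_natCast]
  unfold pvRow
  rw [List.getElem?_map, List.getElem?_range (by omega)]
  simp only [Option.map_some, Option.getD_some]
  congr 2
  omega

theorem pv_B_closed (k n : Int) (m : Nat) (hm : n = (m : Int)) :
    get_people_of_room_alt k n = ((Nat.choose (m + k.toNat) (k.toNat + 1) : Nat) : Int) := by
  unfold get_people_of_room_alt
  rw [PySem.List.pyRange_one]
  have e : (k + 2 - 2).toNat = k.toNat := by omega
  rw [e, List.foldl_map]
  have main : ∀ K : Nat, (List.range K).foldl
      (fun c (t : Nat) => PySem.Int.floordiv (c * (n + ((2 : Int) + (t : Int)) - 1)) ((2 : Int) + (t : Int))) n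
      = ((Nat.choose (m + K) (K + 1) : Nat) : Int) := by
    intro K
    induction K with
    | zero => simp [hm, Nat.choose_one_right]
    | succ K ih =>
        rw [List.range_succ, List.foldl_append, ih]
        simp only [List.foldl_cons, List.foldl_nil]
        have hnum : ((Nat.choose (m + K) (K + 1) : Nat) : Int) * (n + ((2 : Int) + (K : Int)) - 1)
            = ((Nat.choose (m + K + 1) (K + 2) * (K + 2) : Nat) : Int) := by
          have hmul := Nat.add_one_mul_choose_eq (m + K) (K + 1)
          have e2 : n + ((2 : Int) + (K : Int)) - 1 = ((m + K + 1 : Nat) : Int) := by omega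
          rw [e2, ← Nat.cast_mul]
          congr 1
          calc Nat.choose (m + K) (K + 1) * (m + K + 1)
              = (m + K + 1) * Nat.choose (m + K) (K + 1) := Nat.mul_comm _ _
            _ = Nat.choose (m + K + 1) (K + 1 + 1) * (K + 1 + 1) := hmul
            _ = Nat.choose (m + K + 1) (K + 2) * (K + 2) := rfl
        rw [hnum]
        have h2 : ((2 : Int) + (K : Int)) = ((K + 2 : Nat) : Int) := by omega
        rw [h2, PySem.Int.floordiv_natCast, Nat.mul_div_cancel _ (by omega)]
        congr 2
  exact main k.toNat

-- ===== VERDICT (by name: the statement is the Claim_ definition above) =====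
theorem get_people_of_room_spec : Claim_equal_get_people_of_room := by
  intro k n _hdom hpre
  unfold Pre_get_people_of_room at hpre
  unfold Spec_get_people_of_room
  obtain ⟨m, hm, h1⟩ : ∃ m : Nat, n = (m : Int) ∧ 1 ≤ m := ⟨n.toNat, by omega, by omega⟩
  rw [pv_A_closed k n m hm h1, pv_B_closed k n m hm]
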